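-- pv_equiv track=rewrite | github.com/mansiikamble/INFO7375_Reinforcement-Learning-for-Agentic-AI-Systems | src/utils/writing_helpers.py | make_formal
-- ===== SOURCE A (Python) =====
-- def make_formal(text: str) -> str:
--     """Make text more formal"""
--     replacements = {
--         "can't": "cannot",
--         "won't": "will not",
--         "it's": "it is",
--         "we'll": "we will"
--     }
--
--     for informal, formal in replacements.items():
--         text = text.replace(informal, formal)
--
--     return text
-- ===== SOURCE B (Python) =====
-- def make_formal(text: str) -> str:
--     """Make text more formal (single left-to-right scan instead of four full-text replace passes)."""
--     replacements = {
--         "can't": "cannot",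
--         "won't": "will not",
--         "it's": "it is",
--         "we'll": "we will"
--     }
--     out = []
--     i = 0
--     n = len(text)
--     while i < n:
--         for informal, formal in replacements.items():
--             if text.startswith(informal, i):
--                 out.append(formal)
--                 i += len(informal)
--                 break
--         else:
--             out.append(text[i])
--             i += 1
--     return "".join(out)
-- ===== Notes on version B (the rewrite author's own statement) =====
-- stated objective: alternative
-- what changed: Replaces four sequential full-text .replace passes with a single left-to-right scan that matches any of the four keys at each position and emits the replacement directly; valid because the keys neither overlap nor are recreated by any replacement.
import Mathlib
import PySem

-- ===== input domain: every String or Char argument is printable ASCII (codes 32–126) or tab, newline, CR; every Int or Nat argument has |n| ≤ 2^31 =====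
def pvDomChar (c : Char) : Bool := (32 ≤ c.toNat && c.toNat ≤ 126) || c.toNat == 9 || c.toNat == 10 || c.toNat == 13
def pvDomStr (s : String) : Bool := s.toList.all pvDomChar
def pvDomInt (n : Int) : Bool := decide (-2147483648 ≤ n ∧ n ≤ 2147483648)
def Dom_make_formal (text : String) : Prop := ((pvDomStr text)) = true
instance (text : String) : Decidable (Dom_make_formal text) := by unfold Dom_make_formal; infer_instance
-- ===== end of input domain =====

-- B replaces A's four sequential full-text replace passes by one left-to-right scan
-- emitting replacements directly (alternative decomposition; equal because the keys
-- neither overlap nor are recreated by any replacement).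


-- ===== PORT A =====
-- A: a dict of four replacements, applied by sequential text.replace passes over the dict items.
def make_formal (text : String) : String :=
  let replacements : PySem.Dict String String :=
    PySem.Dict.mk [("can't", "cannot"), ("won't", "will not"), ("it's", "it is"), ("we'll", "we will")]
  replacements.items.foldl (fun t p => PySem.Str.replace t p.1 p.2) text

-- ===== PORT B =====
-- B: one left-to-right scan; at each position try the four keys, emit the replacement
-- (or the current character) and continue after it.
def mfScan : List Char → List Char
  | [] => []
  | c :: t =>
    if ("can't".toList).isPrefixOf (c :: t) then
      "cannot".toList ++ mfScan (List.drop 5 (c :: t))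
    else if ("won't".toList).isPrefixOf (c :: t) then
      "will not".toList ++ mfScan (List.drop 5 (c :: t))
    else if ("it's".toList).isPrefixOf (c :: t) then
      "it is".toList ++ mfScan (List.drop 4 (c :: t))
    else if ("we'll".toList).isPrefixOf (c :: t) then
      "we will".toList ++ mfScan (List.drop 5 (c :: t))
    else
      c :: mfScan t
  termination_by l => l.length
  decreasing_by
    all_goals (simp only [List.length_drop, List.length_cons]; omega)

def make_formal_alt (text : String) : String :=
  String.ofList (mfScan text.toList)

-- ===== PRECONDITION & SPEC =====
def Spec_make_formal (text : String) (out : String) : Prop := out = make_formal_alt text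
instance (text : String) (out : String) : Decidable (Spec_make_formal text out) := by unfold Spec_make_formal; infer_instance

-- ===== CLAIM (what is proved, stated in full; the proofs are below) =====
def Claim_equal_make_formal : Prop := ∀ (text : String), Dom_make_formal text → Spec_make_formal text (make_formal text)

-- ===== LEMMAS AND PROOFS =====

-- Single-key replace as a plain structural recursion (no fuel, no accumulator).
def mfRepl : List Char → List Char → List Char → List Char
  | _, _, [] => []
  | [], _, c :: t => c :: t
  | k0 :: ks, r, c :: t =>
    if (k0 :: ks).isPrefixOf (c :: t) then
      r ++ mfRepl (k0 :: ks) r (List.drop (k0 :: ks).length (c :: t))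
    else c :: mfRepl (k0 :: ks) r t
  termination_by _ _ l => l.length
  decreasing_by
    all_goals (simp only [List.length_drop, List.length_cons]; omega)

theorem mfRepl_nil (k r : List Char) : mfRepl k r [] = [] := by
  match k with
  | [] => rw [mfRepl]
  | k0 :: ks => rw [mfRepl]

theorem mfRepl_cons (k r : List Char) (hk : k ≠ []) (c : Char) (t : List Char) :
    mfRepl k r (c :: t) =
      if k.isPrefixOf (c :: t) then r ++ mfRepl k r (List.drop k.length (c :: t))
      else c :: mfRepl k r t := by
  match k, hk with
  | k0 :: ks, _ => rw [mfRepl]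

-- Chars.replace.go computes mfRepl (enough fuel, nonempty key).
theorem go_eq_mfRepl (old new : List Char) (hold : old ≠ []) :
    ∀ fuel l acc, l.length ≤ fuel →
      PySem.Chars.replace.go old new fuel l acc = acc.reverse ++ mfRepl old new l := by
  have hol : 1 ≤ old.length := by
    cases old with
    | nil => exact absurd rfl hold
    | cons a b => simp
  intro fuel
  induction fuel with
  | zero =>
      intro l acc h
      have : l = [] := List.eq_nil_of_length_eq_zero (Nat.le_zero.mp h)
      subst this; simp [PySem.Chars.replace.go, mfRepl_nil]
  | succ n ih =>
      intro l acc h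
      match l with
      | [] => simp [PySem.Chars.replace.go, mfRepl_nil]
      | c :: t =>
        rw [PySem.Chars.replace.go, mfRepl_cons old new hold]
        by_cases hp : old.isPrefixOf (c :: t)
        · simp only [hp, if_true]
          have hlen : (List.drop old.length (c :: t)).length ≤ n := by
            simp only [List.length_drop, List.length_cons]
            simp only [List.length_cons] at h
            omega
          rw [ih _ _ hlen]
          simp
        · simp only [hp]
          have hlen : t.length ≤ n := by
            simp only [List.length_cons] at h
            omega
          rw [ih _ _ hlen]
          simp

theorem replace_eq_mfRepl (s old new : List Char) (hold : old ≠ []) :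
    PySem.Chars.replace s old new = mfRepl old new s := by
  rw [PySem.Chars.replace]
  have he : old.isEmpty = false := by
    cases old with
    | nil => exact absurd rfl hold
    | cons a b => simp
  rw [he]
  simpa using go_eq_mfRepl old new hold s.length s [] (le_refl _)

-- k prefix of a ++ b splits: k within a, or a a prefix of k.
theorem prefix_dichotomy {k a b : List Char} (h : k <+: a ++ b) : k <+: a ∨ a <+: k :=
  List.prefix_or_prefix_of_prefix h (List.prefix_append a b)

theorem prefix_append_of_length_le {k a b : List Char}
    (h : k <+: a ++ b) (hlen : k.length ≤ a.length) : k <+: a := by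
  rcases prefix_dichotomy h with h' | h'
  · exact h'
  · rw [h'.eq_of_length_le hlen]

-- If k matches nowhere starting inside a (no containment, no boundary overlap),
-- mfRepl passes a through unchanged.
theorem mfRepl_homo (k r a : List Char) (hk : k ≠ [])
    (h : ∀ i, i < a.length → ¬ k <+: a.drop i ∧ ¬ a.drop i <+: k) :
    ∀ b, mfRepl k r (a ++ b) = a ++ mfRepl k r b := by
  induction a with
  | nil => intro b; simp
  | cons c a' ih =>
      intro b
      have h0 := h 0 (by simp)
      simp only [List.drop_zero] at h0
      have hnp : ¬ k.isPrefixOf (c :: (a' ++ b)) := by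
        intro hp
        have hp' : k <+: (c :: a') ++ b := by
          simpa using List.isPrefixOf_iff_prefix.mp hp
        rcases prefix_dichotomy hp' with h' | h'
        · exact h0.1 h'
        · exact h0.2 h'
      have ih' := ih (fun i hi => by
        have := h (i + 1) (by simpa using Nat.succ_lt_succ hi)
        simpa using this)
      rw [List.cons_append, mfRepl_cons k r hk, if_neg hnp, ih' b]
      rfl

-- Replacing at an exact key occurrence at the front.
theorem mfRepl_key (k r : List Char) (hk : k ≠ []) (b : List Char) :
    mfRepl k r (k ++ b) = r ++ mfRepl k r b := by
  match k, hk with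
  | c :: t, _ =>
    rw [List.cons_append, mfRepl_cons (c :: t) r (by simp)]
    have hp : (c :: t).isPrefixOf (c :: (t ++ b)) := by
      rw [List.isPrefixOf_iff_prefix]
      exact ⟨b, by simp⟩
    simp only [hp, if_true]
    have hd : List.drop (c :: t).length (c :: (t ++ b)) = b := by
      rw [show (c :: (t ++ b)) = (c :: t) ++ b by simp]
      exact List.drop_left
    rw [hd]

-- No-creation: if p (from a tail-closed family S of short strings that never start
-- inside r) does not occur at the front of l, it does not occur at the front of
-- mfRepl k r l either.
theorem mfRepl_nocreate (k r : List Char) (S : List (List Char)) (hk : k ≠ [])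
    (hS : ∀ p ∈ S, p ≠ [] ∧ ¬ p <+: r ∧ p.length ≤ r.length ∧ (p.tail = [] ∨ p.tail ∈ S)) :
    ∀ n l, l.length ≤ n → ∀ p ∈ S, ¬ p <+: l → ¬ p <+: mfRepl k r l := by
  intro n
  induction n with
  | zero =>
      intro l hl p hp hnl
      have : l = [] := List.eq_nil_of_length_eq_zero (Nat.le_zero.mp hl)
      subst this; rw [mfRepl_nil]; exact hnl
  | succ n ih =>
      intro l hl p hp hnl
      match l with
      | [] => rw [mfRepl_nil]; exact hnl
      | c :: t =>
        rw [mfRepl_cons k r hk]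
        by_cases hpre : k.isPrefixOf (c :: t)
        · simp only [hpre, if_true]
          intro habs
          obtain ⟨hpne, hpr, hplen, _⟩ := hS p hp
          exact hpr (prefix_append_of_length_le habs hplen)
        · simp only [hpre]
          intro habs
          obtain ⟨hpne, hpr, hplen, htail⟩ := hS p hp
          match p, hpne with
          | c' :: p', _ =>
            rcases habs with ⟨s, hs⟩
            rw [List.cons_append] at hs
            injection hs with hc hs'
            subst hc
            have hp'pref : p' <+: mfRepl k r t := ⟨s, hs'⟩
            rcases htail with hte | hte
            · simp only [List.tail_cons] at hte
              subst hte
              exact hnl ⟨t, by simp⟩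
            · simp only [List.tail_cons] at hte
              have hnt : ¬ p' <+: t := by
                intro hq
                rcases hq with ⟨s', hs''⟩
                exact hnl ⟨s', by rw [List.cons_append, hs'']⟩
              exact ih t (by simp only [List.length_cons] at hl; omega) p' hte hnt hp'pref

-- The four single-key passes (A's pipeline, fuel- and accumulator-free).
def mfR1 (l : List Char) : List Char := mfRepl "can't".toList "cannot".toList l
def mfR2 (l : List Char) : List Char := mfRepl "won't".toList "will not".toList l
def mfR3 (l : List Char) : List Char := mfRepl "it's".toList "it is".toList l
def mfR4 (l : List Char) : List Char := mfRepl "we'll".toList "we will".toList l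

-- Tail-closed families of patterns that survive each pass unchanged.
def mfS1 : List (List Char) :=
  ["won't".toList, "on't".toList, "n't".toList, "'t".toList, "t".toList,
   "it's".toList, "t's".toList, "'s".toList, "s".toList,
   "we'll".toList, "e'll".toList, "'ll".toList, "ll".toList, "l".toList]
def mfS2 : List (List Char) :=
  ["it's".toList, "t's".toList, "'s".toList, "s".toList,
   "we'll".toList, "e'll".toList, "'ll".toList, "ll".toList, "l".toList]
def mfS3 : List (List Char) :=
  ["we'll".toList, "e'll".toList, "'ll".toList, "ll".toList, "l".toList]

theorem mfNC1 (l : List Char) (p : List Char) (hp : p ∈ mfS1) (h : ¬ p <+: l) :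
    ¬ p <+: mfR1 l :=
  mfRepl_nocreate _ _ mfS1 (by decide) (by decide) l.length l (le_refl _) p hp h

theorem mfNC2 (l : List Char) (p : List Char) (hp : p ∈ mfS2) (h : ¬ p <+: l) :
    ¬ p <+: mfR2 l :=
  mfRepl_nocreate _ _ mfS2 (by decide) (by decide) l.length l (le_refl _) p hp h

theorem mfNC3 (l : List Char) (p : List Char) (hp : p ∈ mfS3) (h : ¬ p <+: l) :
    ¬ p <+: mfR3 l :=
  mfRepl_nocreate _ _ mfS3 (by decide) (by decide) l.length l (le_refl _) p hp h

-- length bookkeeping for a key occurrence at the front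
theorem mfLenAux {k b : List Char} {c : Char} {t : List Char} {n : Nat}
    (hb : k ++ b = c :: t) (hl : (c :: t).length ≤ n + 1) (hk : 1 ≤ k.length) :
    b.length ≤ n := by
  have h := congrArg List.length hb
  rw [List.length_append, List.length_cons] at h
  rw [List.length_cons] at hl
  omega

-- The main pipeline lemma: the four sequential passes equal the one-pass scan.
theorem mfPipeline : ∀ n l, l.length ≤ n → mfR4 (mfR3 (mfR2 (mfR1 l))) = mfScan l := by
  intro n
  induction n with
  | zero =>
      intro l hl
      have : l = [] := List.eq_nil_of_length_eq_zero (Nat.le_zero.mp hl)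
      subst this
      simp [mfR1, mfR2, mfR3, mfR4, mfRepl_nil, mfScan]
  | succ n ih =>
      intro l hl
      match l with
      | [] => simp [mfR1, mfR2, mfR3, mfR4, mfRepl_nil, mfScan]
      | c :: t =>
        by_cases h1 : ("can't".toList).isPrefixOf (c :: t)
        · obtain ⟨b, hb⟩ := List.isPrefixOf_iff_prefix.mp h1
          have hbl : b.length ≤ n := mfLenAux hb hl (by decide)
          have e1 : mfR1 (c :: t) = "cannot".toList ++ mfR1 b := by
            rw [mfR1, ← hb]; exact mfRepl_key _ _ (by decide) b
          have e2 : mfR2 ("cannot".toList ++ mfR1 b) = "cannot".toList ++ mfR2 (mfR1 b) := by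
            rw [mfR2, mfR2]; exact mfRepl_homo _ _ _ (by decide) (by decide) _
          have e3 : mfR3 ("cannot".toList ++ mfR2 (mfR1 b)) = "cannot".toList ++ mfR3 (mfR2 (mfR1 b)) := by
            rw [mfR3, mfR3]; exact mfRepl_homo _ _ _ (by decide) (by decide) _
          have e4 : mfR4 ("cannot".toList ++ mfR3 (mfR2 (mfR1 b))) = "cannot".toList ++ mfR4 (mfR3 (mfR2 (mfR1 b))) := by
            rw [mfR4, mfR4]; exact mfRepl_homo _ _ _ (by decide) (by decide) _
          rw [mfScan]
          simp only [h1, if_true]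
          have hdrop : List.drop 5 (c :: t) = b := by
            rw [← hb, show (5:Nat) = ("can't".toList).length from rfl]; exact List.drop_left
          rw [hdrop, e1, e2, e3, e4, ih b hbl]
        · by_cases h2 : ("won't".toList).isPrefixOf (c :: t)
          · obtain ⟨b, hb⟩ := List.isPrefixOf_iff_prefix.mp h2
            have hbl : b.length ≤ n := mfLenAux hb hl (by decide)
            have e1 : mfR1 (c :: t) = "won't".toList ++ mfR1 b := by
              rw [mfR1, ← hb]
              exact mfRepl_homo _ _ _ (by decide) (by decide) b
            have e2 : mfR2 ("won't".toList ++ mfR1 b) = "will not".toList ++ mfR2 (mfR1 b) := by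
              rw [mfR2, mfR2]; exact mfRepl_key _ _ (by decide) _
            have e3 : mfR3 ("will not".toList ++ mfR2 (mfR1 b)) = "will not".toList ++ mfR3 (mfR2 (mfR1 b)) := by
              rw [mfR3, mfR3]; exact mfRepl_homo _ _ _ (by decide) (by decide) _
            have e4 : mfR4 ("will not".toList ++ mfR3 (mfR2 (mfR1 b))) = "will not".toList ++ mfR4 (mfR3 (mfR2 (mfR1 b))) := by
              rw [mfR4, mfR4]; exact mfRepl_homo _ _ _ (by decide) (by decide) _
            rw [mfScan]
            simp only [h1, h2, if_true, if_false, Bool.false_eq_true]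
            have hdrop : List.drop 5 (c :: t) = b := by
              rw [← hb, show (5:Nat) = ("won't".toList).length from rfl]; exact List.drop_left
            rw [hdrop, e1, e2, e3, e4, ih b hbl]
          · by_cases h3 : ("it's".toList).isPrefixOf (c :: t)
            · obtain ⟨b, hb⟩ := List.isPrefixOf_iff_prefix.mp h3
              have hbl : b.length ≤ n := mfLenAux hb hl (by decide)
              have e1 : mfR1 (c :: t) = "it's".toList ++ mfR1 b := by
                rw [mfR1, ← hb]
                exact mfRepl_homo _ _ _ (by decide) (by decide) b
              have e2 : mfR2 ("it's".toList ++ mfR1 b) = "it's".toList ++ mfR2 (mfR1 b) := by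
                rw [mfR2, mfR2]; exact mfRepl_homo _ _ _ (by decide) (by decide) _
              have e3 : mfR3 ("it's".toList ++ mfR2 (mfR1 b)) = "it is".toList ++ mfR3 (mfR2 (mfR1 b)) := by
                rw [mfR3, mfR3]; exact mfRepl_key _ _ (by decide) _
              have e4 : mfR4 ("it is".toList ++ mfR3 (mfR2 (mfR1 b))) = "it is".toList ++ mfR4 (mfR3 (mfR2 (mfR1 b))) := by
                rw [mfR4, mfR4]; exact mfRepl_homo _ _ _ (by decide) (by decide) _
              rw [mfScan]
              simp only [h1, h2, h3, if_true, if_false, Bool.false_eq_true]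
              have hdrop : List.drop 4 (c :: t) = b := by
                rw [← hb, show (4:Nat) = ("it's".toList).length from rfl]; exact List.drop_left
              rw [hdrop, e1, e2, e3, e4, ih b hbl]
            · by_cases h4 : ("we'll".toList).isPrefixOf (c :: t)
              · obtain ⟨b, hb⟩ := List.isPrefixOf_iff_prefix.mp h4
                have hbl : b.length ≤ n := mfLenAux hb hl (by decide)
                have e1 : mfR1 (c :: t) = "we'll".toList ++ mfR1 b := by
                  rw [mfR1, ← hb]
                  exact mfRepl_homo _ _ _ (by decide) (by decide) b
                have e2 : mfR2 ("we'll".toList ++ mfR1 b) = "we'll".toList ++ mfR2 (mfR1 b) := by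
                  rw [mfR2, mfR2]; exact mfRepl_homo _ _ _ (by decide) (by decide) _
                have e3 : mfR3 ("we'll".toList ++ mfR2 (mfR1 b)) = "we'll".toList ++ mfR3 (mfR2 (mfR1 b)) := by
                  rw [mfR3, mfR3]; exact mfRepl_homo _ _ _ (by decide) (by decide) _
                have e4 : mfR4 ("we'll".toList ++ mfR3 (mfR2 (mfR1 b))) = "we will".toList ++ mfR4 (mfR3 (mfR2 (mfR1 b))) := by
                  rw [mfR4, mfR4]; exact mfRepl_key _ _ (by decide) _
                rw [mfScan]
                simp only [h1, h2, h3, h4, if_true, if_false, Bool.false_eq_true]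
                have hdrop : List.drop 5 (c :: t) = b := by
                  rw [← hb, show (5:Nat) = ("we'll".toList).length from rfl]; exact List.drop_left
                rw [hdrop, e1, e2, e3, e4, ih b hbl]
              · -- no key matches at the front: every pass keeps the head character.
                have hn2 : ¬ ("won't".toList) <+: (c :: t) := fun h => h2 (List.isPrefixOf_iff_prefix.mpr h)
                have hn3 : ¬ ("it's".toList) <+: (c :: t) := fun h => h3 (List.isPrefixOf_iff_prefix.mpr h)
                have hn4 : ¬ ("we'll".toList) <+: (c :: t) := fun h => h4 (List.isPrefixOf_iff_prefix.mpr h)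
                have e1 : mfR1 (c :: t) = c :: mfR1 t := by
                  rw [mfR1, mfR1, mfRepl_cons _ _ (by decide)]
                  rw [if_neg h1]
                have hn2' : ¬ ("won't".toList) <+: mfR1 (c :: t) := mfNC1 _ _ (by decide) hn2
                have hn3' : ¬ ("it's".toList) <+: mfR1 (c :: t) := mfNC1 _ _ (by decide) hn3
                have hn4' : ¬ ("we'll".toList) <+: mfR1 (c :: t) := mfNC1 _ _ (by decide) hn4
                have e2 : mfR2 (mfR1 (c :: t)) = c :: mfR2 (mfR1 t) := by
                  rw [e1] at hn2' ⊢
                  have hb2 : ¬ ("won't".toList).isPrefixOf (c :: mfR1 t) :=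
                    fun h => hn2' (List.isPrefixOf_iff_prefix.mp h)
                  rw [mfR2, mfR2, mfRepl_cons _ _ (by decide)]
                  rw [if_neg hb2]
                have hn3'' : ¬ ("it's".toList) <+: mfR2 (mfR1 (c :: t)) := mfNC2 _ _ (by decide) hn3'
                have hn4'' : ¬ ("we'll".toList) <+: mfR2 (mfR1 (c :: t)) := mfNC2 _ _ (by decide) hn4'
                have e3 : mfR3 (mfR2 (mfR1 (c :: t))) = c :: mfR3 (mfR2 (mfR1 t)) := by
                  rw [e2] at hn3'' ⊢
                  have hb3 : ¬ ("it's".toList).isPrefixOf (c :: mfR2 (mfR1 t)) :=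
                    fun h => hn3'' (List.isPrefixOf_iff_prefix.mp h)
                  rw [mfR3, mfR3, mfRepl_cons _ _ (by decide)]
                  rw [if_neg hb3]
                have hn4''' : ¬ ("we'll".toList) <+: mfR3 (mfR2 (mfR1 (c :: t))) := mfNC3 _ _ (by decide) hn4''
                have e4 : mfR4 (mfR3 (mfR2 (mfR1 (c :: t)))) = c :: mfR4 (mfR3 (mfR2 (mfR1 t))) := by
                  rw [e3] at hn4''' ⊢
                  have hb4 : ¬ ("we'll".toList).isPrefixOf (c :: mfR3 (mfR2 (mfR1 t))) :=
                    fun h => hn4''' (List.isPrefixOf_iff_prefix.mp h)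
                  rw [mfR4, mfR4, mfRepl_cons _ _ (by decide)]
                  rw [if_neg hb4]
                rw [e4, mfScan]
                simp only [h1, h2, h3, h4, if_false, Bool.false_eq_true]
                rw [ih t (by simp only [List.length_cons] at hl; omega)]

theorem make_formal_eq (text : String) : make_formal text = make_formal_alt text := by
  have hA : make_formal text =
      PySem.Str.replace (PySem.Str.replace (PySem.Str.replace
        (PySem.Str.replace text "can't" "cannot") "won't" "will not") "it's" "it is")
        "we'll" "we will" := rfl
  rw [hA]
  simp only [PySem.Str.replace, String.toList_ofList]
  rw [replace_eq_mfRepl _ _ _ (by decide), replace_eq_mfRepl _ _ _ (by decide),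
      replace_eq_mfRepl _ _ _ (by decide), replace_eq_mfRepl _ _ _ (by decide)]
  rw [show mfRepl "we'll".toList "we will".toList
        (mfRepl "it's".toList "it is".toList
          (mfRepl "won't".toList "will not".toList
            (mfRepl "can't".toList "cannot".toList text.toList))) =
      mfR4 (mfR3 (mfR2 (mfR1 text.toList))) from rfl]
  rw [mfPipeline text.toList.length text.toList (le_refl _)]
  rfl

-- ===== VERDICT (by name: the statement is the Claim_ definition above) =====
theorem make_formal_spec : Claim_equal_make_formal := by
  intro text _
  unfold Spec_make_formal
  exact make_formal_eq text
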